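-- pv_equiv track=rewrite | github.com/xinyu-dev/NeMo-Skills | recipes/openmathreasoning/scripts/preprocess_tir_generations.py | validate_code_execution
-- ===== SOURCE A (Python) =====
-- def validate_code_execution(text, code_begin="```python", code_end="```"):
--     lines = text.split('\n')
--     i = 0
--
--     while i < len(lines):
--         if lines[i] == code_begin:
--             code_end_idx = -1
--             for j in range(i + 1, len(lines)):
--                 if lines[j] == code_end:
--                     code_end_idx = j
--                     break
--
--             if code_end_idx == -1:
--                 return False
--
--             if code_end_idx + 1 >= len(lines) or lines[code_end_idx + 1] != "```output":
--                 return False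
--
--             output_end_idx = -1
--             for j in range(code_end_idx + 2, len(lines)):
--                 if lines[j] == "```":
--                     output_end_idx = j
--                     break
--
--             if output_end_idx == -1:
--                 return False
--
--             i = output_end_idx + 1
--         else:
--             i += 1
--
--     return True
-- ===== SOURCE B (Python) =====
-- def validate_code_execution(text, code_begin="```python", code_end="```"):
--     # single forward pass with an explicit state machine
--     OUTSIDE, IN_CODE, EXPECT_OUTPUT, IN_OUTPUT = range(4)
--     state = OUTSIDE
--     for line in text.split('\n'):
--         if state == OUTSIDE:
--             if line == code_begin:
--                 state = IN_CODE
--         elif state == IN_CODE: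
--             if line == code_end:
--                 state = EXPECT_OUTPUT
--         elif state == EXPECT_OUTPUT:
--             if line != "```output":
--                 return False
--             state = IN_OUTPUT
--         else:
--             if line == "```":
--                 state = OUTSIDE
--     return state == OUTSIDE
-- ===== Notes on version B (the rewrite author's own statement) =====
-- stated objective: simpler
-- what changed: Replaced the index-jumping outer while loop with two inner forward searches by a single forward pass over the lines driven by an explicit 4-state machine (OUTSIDE/IN_CODE/EXPECT_OUTPUT/IN_OUTPUT).
import Mathlib
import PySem

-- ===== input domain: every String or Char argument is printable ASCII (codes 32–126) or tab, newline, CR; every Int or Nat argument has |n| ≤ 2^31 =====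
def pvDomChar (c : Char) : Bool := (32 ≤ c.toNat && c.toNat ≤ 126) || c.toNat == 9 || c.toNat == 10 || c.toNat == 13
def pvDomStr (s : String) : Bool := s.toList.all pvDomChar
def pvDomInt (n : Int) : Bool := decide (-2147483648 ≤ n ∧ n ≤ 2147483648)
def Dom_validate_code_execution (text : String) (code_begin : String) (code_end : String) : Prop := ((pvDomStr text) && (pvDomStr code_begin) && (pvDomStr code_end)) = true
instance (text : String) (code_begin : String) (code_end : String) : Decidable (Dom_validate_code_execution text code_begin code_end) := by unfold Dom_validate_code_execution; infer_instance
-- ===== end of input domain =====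

-- B replaces A's index-jumping while loop (with two inner forward searches) by a single
-- forward pass over the lines driven by an explicit 4-state machine; same cost, simpler.

-- ===== PORT A =====
-- Python's inner `for j in range(start, len(lines)): if lines[j] == target: idx = j; break`
-- with the -1 sentinel, ported step for step.
def pvSearchFrom (lines : List String) (target : String) (j : Nat) : Int :=
  if h : j < lines.length then
    if lines[j] = target then (j : Int) else pvSearchFrom lines target (j + 1)
  else -1
termination_by lines.length - j

-- the found index is ≥ the start index (needed for the while loop's termination)
theorem pvSearchFrom_ge (lines : List String) (target : String) (j : Nat)
    (h : pvSearchFrom lines target j ≠ -1) :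
    (j : Int) ≤ pvSearchFrom lines target j ∧ (pvSearchFrom lines target j).toNat < lines.length := by
  induction j using pvSearchFrom.induct lines target with
  | case1 j hj heq =>
    rw [pvSearchFrom] at h ⊢
    simp only [hj, dif_pos, if_pos heq] at h ⊢
    exact ⟨le_refl _, by omega⟩
  | case2 j hj hne ih =>
    rw [pvSearchFrom] at h ⊢
    simp only [hj, dif_pos, if_neg hne] at h ⊢
    have := ih h; omega
  | case3 j hj =>
    rw [pvSearchFrom] at h; simp [hj] at h

-- Python's `while i < len(lines): …` with `i = output_end_idx + 1` jumps
def pvLoopA (lines : List String) (code_begin code_end : String) (i : Nat) : Bool :=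
  if hi : i < lines.length then
    if lines[i] = code_begin then
      if hce : pvSearchFrom lines code_end (i + 1) = -1 then false
      else
        if hk : (pvSearchFrom lines code_end (i + 1)).toNat + 1 ≥ lines.length then false
        else if lines[(pvSearchFrom lines code_end (i + 1)).toNat + 1]'(by omega) ≠ "```output" then
          false
        else
          if ho : pvSearchFrom lines "```" ((pvSearchFrom lines code_end (i + 1)).toNat + 2) = -1 then
            false
          else
            pvLoopA lines code_begin code_end
              ((pvSearchFrom lines "```" ((pvSearchFrom lines code_end (i + 1)).toNat + 2)).toNat + 1)
    else pvLoopA lines code_begin code_end (i + 1)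
  else true
termination_by lines.length - i
decreasing_by
  · have h1 := pvSearchFrom_ge lines "```" ((pvSearchFrom lines code_end (i + 1)).toNat + 2) ho
    have h2 := pvSearchFrom_ge lines code_end (i + 1) hce
    omega
  · omega

def validate_code_execution (text : String) (code_begin : String) (code_end : String) : Bool :=
  pvLoopA ((PySem.Str.split? text "\n").getD []) code_begin code_end 0

-- ===== PORT B =====
inductive PvSt where
  | outside | inCode | expectOut | inOut
  deriving DecidableEq, Repr

def pvRunB (code_begin code_end : String) (lines : List String) (st : PvSt) : Bool :=
  match lines with
  | [] => st = PvSt.outside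
  | l :: rest =>
    match st with
    | .outside => pvRunB code_begin code_end rest (if l = code_begin then .inCode else .outside)
    | .inCode => pvRunB code_begin code_end rest (if l = code_end then .expectOut else .inCode)
    | .expectOut =>
        if l ≠ "```output" then false
        else pvRunB code_begin code_end rest .inOut
    | .inOut => pvRunB code_begin code_end rest (if l = "```" then .outside else .inOut)

def validate_code_execution_alt (text : String) (code_begin : String) (code_end : String) : Bool :=
  pvRunB code_begin code_end ((PySem.Str.split? text "\n").getD []) .outside

-- ===== PRECONDITION & SPEC =====
def Spec_validate_code_execution (text : String) (code_begin : String) (code_end : String) (out : Bool) : Prop := out = validate_code_execution_alt text code_begin code_end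
instance (text : String) (code_begin : String) (code_end : String) (out : Bool) : Decidable (Spec_validate_code_execution text code_begin code_end out) := by unfold Spec_validate_code_execution; infer_instance

-- ===== CLAIM (what is proved, stated in full; the proofs are below) =====
def Claim_equal_validate_code_execution : Prop := ∀ (text : String) (code_begin : String) (code_end : String), Dom_validate_code_execution text code_begin code_end → Spec_validate_code_execution text code_begin code_end (validate_code_execution text code_begin code_end)

-- ===== LEMMAS AND PROOFS =====

theorem pvDrop_cons (lines : List String) (j : Nat) (h : j < lines.length) :
    lines.drop j = lines[j] :: lines.drop (j + 1) :=
  List.drop_eq_getElem_cons h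

-- B's IN_CODE scan agrees with A's forward search for code_end
theorem pvRunB_inCode (cb ce : String) (lines : List String) (j : Nat) :
    pvRunB cb ce (lines.drop j) .inCode =
      (if _h : pvSearchFrom lines ce j = -1 then false
       else pvRunB cb ce (lines.drop ((pvSearchFrom lines ce j).toNat + 1)) .expectOut) := by
  induction j using pvSearchFrom.induct lines ce with
  | case1 j hj heq =>
    rw [pvDrop_cons lines j hj, pvSearchFrom]
    simp [pvRunB, hj, heq]
  | case2 j hj hne ih =>
    rw [pvDrop_cons lines j hj, pvSearchFrom]
    simp only [pvRunB, hj, dif_pos, if_neg hne]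
    exact ih
  | case3 j hj =>
    have : lines.drop j = [] := List.drop_eq_nil_of_le (by omega)
    rw [this, pvSearchFrom]
    simp [pvRunB, hj]

-- B's IN_OUTPUT scan agrees with A's forward search for "```"
theorem pvRunB_inOut (cb ce : String) (lines : List String) (j : Nat) :
    pvRunB cb ce (lines.drop j) .inOut =
      (if _h : pvSearchFrom lines "```" j = -1 then false
       else pvRunB cb ce (lines.drop ((pvSearchFrom lines "```" j).toNat + 1)) .outside) := by
  induction j using pvSearchFrom.induct lines "```" with
  | case1 j hj heq =>
    rw [pvDrop_cons lines j hj, pvSearchFrom]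
    simp [pvRunB, hj, heq]
  | case2 j hj hne ih =>
    rw [pvDrop_cons lines j hj, pvSearchFrom]
    simp only [pvRunB, hj, dif_pos, if_neg hne]
    exact ih
  | case3 j hj =>
    have : lines.drop j = [] := List.drop_eq_nil_of_le (by omega)
    rw [this, pvSearchFrom]
    simp [pvRunB, hj]

theorem pvLoopA_eq_runB (lines : List String) (cb ce : String) (i : Nat) :
    pvLoopA lines cb ce i = pvRunB cb ce (lines.drop i) .outside := by
  induction i using pvLoopA.induct lines cb ce with
  | case1 i hi hb hce =>
    -- code_begin at i, but code_end never found after it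
    rw [pvLoopA, pvDrop_cons lines i hi]
    simp only [pvRunB, hi, dif_pos, if_pos hb, dif_pos hce]
    rw [pvRunB_inCode cb ce lines (i + 1), dif_pos hce]
  | case2 i hi hb hce hk =>
    -- code_end is the last line: no "```output" line exists
    rw [pvLoopA, pvDrop_cons lines i hi]
    simp only [pvRunB, hi, dif_pos, if_pos hb, dif_neg hce, dif_pos hk]
    rw [pvRunB_inCode cb ce lines (i + 1), dif_neg hce]
    have hnil : lines.drop ((pvSearchFrom lines ce (i + 1)).toNat + 1) = [] :=
      List.drop_eq_nil_of_le (by omega)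
    simp [hnil, pvRunB]
  | case3 i hi hb hce hk hout =>
    -- line after code_end is not "```output"
    rw [pvLoopA, pvDrop_cons lines i hi]
    simp only [pvRunB, hi, dif_pos, if_pos hb, dif_neg hce, dif_neg hk, if_pos hout]
    rw [pvRunB_inCode cb ce lines (i + 1), dif_neg hce,
      pvDrop_cons lines ((pvSearchFrom lines ce (i + 1)).toNat + 1) (by omega)]
    simp only [pvRunB, if_pos hout]
  | case4 i hi hb hce hk hout ho =>
    -- closing "```" of the output block not found
    rw [pvLoopA, pvDrop_cons lines i hi]
    simp only [pvRunB, hi, dif_pos, if_pos hb, dif_neg hce, dif_neg hk, if_neg hout, dif_pos ho]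
    rw [pvRunB_inCode cb ce lines (i + 1), dif_neg hce,
      pvDrop_cons lines ((pvSearchFrom lines ce (i + 1)).toNat + 1) (by omega)]
    simp only [pvRunB, if_neg hout]
    rw [pvRunB_inOut cb ce lines ((pvSearchFrom lines ce (i + 1)).toNat + 2), dif_pos ho]
  | case5 i hi hb hce hk hout ho ih =>
    -- full block found; both sides continue after the closing "```"
    rw [pvLoopA, pvDrop_cons lines i hi]
    simp only [pvRunB, hi, dif_pos, if_pos hb, dif_neg hce, dif_neg hk, if_neg hout, dif_neg ho]
    rw [pvRunB_inCode cb ce lines (i + 1), dif_neg hce,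
      pvDrop_cons lines ((pvSearchFrom lines ce (i + 1)).toNat + 1) (by omega)]
    simp only [pvRunB, if_neg hout]
    rw [pvRunB_inOut cb ce lines ((pvSearchFrom lines ce (i + 1)).toNat + 2), dif_neg ho]
    exact ih
  | case6 i hi hb ih =>
    -- not code_begin: both sides just move on
    rw [pvLoopA, pvDrop_cons lines i hi]
    simp only [pvRunB, hi, dif_pos, if_neg hb]
    exact ih
  | case7 i hi =>
    -- i ≥ len: A returns True, B's state is OUTSIDE on the empty remainder
    have hnil : lines.drop i = [] := List.drop_eq_nil_of_le (by omega)
    rw [pvLoopA, hnil]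
    simp [pvRunB, hi]

-- ===== VERDICT (by name: the statement is the Claim_ definition above) =====
theorem validate_code_execution_spec : Claim_equal_validate_code_execution := by
  intro text cb ce _
  unfold Spec_validate_code_execution validate_code_execution validate_code_execution_alt
  simpa using pvLoopA_eq_runB ((PySem.Str.split? text "\n").getD []) cb ce 0
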